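-- pv_equiv track=rewrite | github.com/data-mermaid/mermaid-api | src/api/reports/summary_report.py | _filter_columns
-- ===== SOURCE A (Python) =====
-- from typing import Dict, List, Set, Tuple
--
-- def _match_length(key, substring):
--     """Return the length of the matching prefix."""
--     length = min(len(key), len(substring))
--     for i in range(length):
--         if key[i] != substring[i]:
--             return i
--     return length
--
-- def _partial_key_match(d: dict, substring):
--     """Match dictionary key characters in substring.
--
--     Args:
--         d (dict): Dictionary
--         substring ([type]): String to match.
--
--     Returns:
--         list: Returns dictionary key matches.  List is ordered by number of character matches.
--     """
--     matches = [(key, _match_length(key, substring)) for key in d.keys()]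
--     matches.sort(key=lambda x: (-x[1], x[0]))
--     return [key for key, length in matches if length > 0]
--
-- def _filter_columns(
--     headers: List[str],
--     cols: List[list],
--     display_header_lookup: Dict[str, None],
--     additional_header_lookup: Set[str],
-- ) -> Tuple[List[str], List[list]]:
--     new_headers = []
--     new_cols = []
--
--     # Remove site_id, it was only needed to attach
--     # covariates to the content.
--     additional_header_lookup = list(additional_header_lookup)
--     additional_header_lookup.append("site_id")
--     for header, col in zip(headers, cols):
--         if header in additional_header_lookup:
--             continue
--         elif header in display_header_lookup:
--             new_headers.append(display_header_lookup[header])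
--             new_cols.append(col)
--         else:
--             matches = _partial_key_match(display_header_lookup, header)
--             if len(matches) > 1:
--                 h = header[len(matches[0]) + 1 :]
--                 new_headers.append(h)
--             else:
--                 new_headers.append(header)
--             new_cols.append(col)
--
--     return new_headers, new_cols
-- ===== SOURCE B (Python) =====
-- from typing import Dict, List, Set, Tuple
--
-- def _prefix_len(a, b):
--     """Length of the common prefix, via pairwise zip."""
--     n = 0
--     for x, y in zip(a, b):
--         if x != y:
--             break
--         n += 1
--     return n
--
-- def _display_name(display_header_lookup, header):
--     """New name for a header: direct lookup, else strip the best partial key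
--     when more than one key shares a prefix with the header."""
--     if header in display_header_lookup:
--         return display_header_lookup[header]
--     count = 0
--     best = None  # (key, prefix_len) with max prefix_len, ties -> smaller key
--     for key in display_header_lookup:
--         m = _prefix_len(key, header)
--         if m > 0:
--             count += 1
--             if best is None or m > best[1] or (m == best[1] and key < best[0]):
--                 best = (key, m)
--     if count > 1:
--         return header[len(best[0]) + 1:]
--     return header
--
-- def _filter_columns(
--     headers: List[str],
--     cols: List[list],
--     display_header_lookup: Dict[str, None],
--     additional_header_lookup: Set[str],
-- ) -> Tuple[List[str], List[list]]:
--     skip = set(additional_header_lookup)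
--     skip.add("site_id")
--     kept = [(h, c) for h, c in zip(headers, cols) if h not in skip]
--     new_headers = [_display_name(display_header_lookup, h) for h, _ in kept]
--     new_cols = [c for _, c in kept]
--     return new_headers, new_cols
-- ===== Notes on version B (the rewrite author's own statement) =====
-- stated objective: simpler
-- what changed: B replaces A's build-all-(key,match_length)-pairs + sort-by-(-length,key) + filter pipeline (and the two-list accumulator loop) with a filter/map over the kept rows and, per header, a single pass over the dict keys maintaining a count of positive-length prefix matches and the current best key (max match length, ties to the smaller key).
import Mathlib
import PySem

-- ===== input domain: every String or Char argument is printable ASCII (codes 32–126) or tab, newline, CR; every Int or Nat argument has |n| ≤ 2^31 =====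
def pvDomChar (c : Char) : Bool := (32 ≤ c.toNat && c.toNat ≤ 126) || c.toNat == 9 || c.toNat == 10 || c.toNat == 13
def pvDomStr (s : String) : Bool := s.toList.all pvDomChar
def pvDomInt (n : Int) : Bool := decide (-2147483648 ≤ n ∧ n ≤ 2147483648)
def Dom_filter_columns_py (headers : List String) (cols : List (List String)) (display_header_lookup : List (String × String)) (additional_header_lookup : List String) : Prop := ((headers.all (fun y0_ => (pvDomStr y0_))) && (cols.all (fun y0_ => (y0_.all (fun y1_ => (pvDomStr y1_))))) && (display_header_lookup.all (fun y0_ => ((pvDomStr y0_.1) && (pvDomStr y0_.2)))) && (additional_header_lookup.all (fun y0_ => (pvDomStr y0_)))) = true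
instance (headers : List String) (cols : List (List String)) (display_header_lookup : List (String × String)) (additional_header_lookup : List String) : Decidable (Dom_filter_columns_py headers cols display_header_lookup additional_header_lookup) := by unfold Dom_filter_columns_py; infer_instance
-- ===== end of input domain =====

-- B replaces A's build-all-pairs + sort-by-(-length,key) + filter with a single fold keeping a
-- count of positive-length prefix matches and the current best key (objective: simpler, no sort).

-- ===== PORT A =====
-- _match_length: A's indexed loop over range(min(len,len)) rendered structurally over the two
-- char lists; it returns the first mismatch index = the number of equal leading chars, exactly
-- as the Python loop does.
def pvMatchLength : List Char → List Char → Nat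
  | k :: ks, c :: cs => if k ≠ c then 0 else pvMatchLength ks cs + 1
  | _, _ => 0

-- _partial_key_match
def pvPartialKeyMatch (d : PySem.Dict String String) (substring : String) : List String :=
  let ms := d.keys.map (fun key => (key, pvMatchLength key.toList substring.toList))
  let sortedM := PySem.List.sorted2 ms (fun x => -((x.2 : Int))) (fun x => x.1)
  (sortedM.filter (fun x => decide (0 < x.2))).map (fun x => x.1)

-- _filter_columns
def filter_columns_py (headers : List String) (cols : List (List String)) (display_header_lookup : List (String × String)) (additional_header_lookup : List String) : List String × List (List String) :=
  let d := PySem.Dict.ofList display_header_lookup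
  let ahl := additional_header_lookup ++ ["site_id"]
  (headers.zip cols).foldl
    (fun (acc : List String × List (List String)) hc =>
      if hc.1 ∈ ahl then acc
      else if d.contains hc.1 then (acc.1 ++ [d.getD hc.1 ""], acc.2 ++ [hc.2])
      else
        let ms := pvPartialKeyMatch d hc.1
        if 1 < ms.length then
          (acc.1 ++ [PySem.Str.slice hc.1 (some (PySem.Str.len (ms.headD "") + 1)) none], acc.2 ++ [hc.2])
        else (acc.1 ++ [hc.1], acc.2 ++ [hc.2]))
    ([], [])

-- ===== PORT B =====
-- _prefix_len: B's loop over zip(a, b) with break at the first mismatch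
def pvPrefixLen : List (Char × Char) → Nat
  | [] => 0
  | (x, y) :: t => if x ≠ y then 0 else pvPrefixLen t + 1

-- the best-candidate update inside B's single pass
def pvBestStep (best : Option (String × Nat)) (km : String × Nat) : Option (String × Nat) :=
  match best with
  | none => some km
  | some b => if b.2 < km.2 ∨ (km.2 = b.2 ∧ km.1 < b.1) then some km else some b

-- _display_name
def pvDisplayName (d : PySem.Dict String String) (header : String) : String :=
  if d.contains header then d.getD header ""
  else
    let st := d.keys.foldl
      (fun (s : Int × Option (String × Nat)) key =>
        let m := pvPrefixLen (key.toList.zip header.toList)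
        if 0 < m then (s.1 + 1, pvBestStep s.2 (key, m)) else s)
      (0, none)
    if 1 < st.1 then
      match st.2 with
      | some b => PySem.Str.slice header (some (PySem.Str.len b.1 + 1)) none
      | none => header
    else header

-- _filter_columns (B)
def filter_columns_py_alt (headers : List String) (cols : List (List String)) (display_header_lookup : List (String × String)) (additional_header_lookup : List String) : List String × List (List String) :=
  let d := PySem.Dict.ofList display_header_lookup
  let skip := PySem.Set.add (PySem.Set.ofList additional_header_lookup) "site_id"
  let kept := (headers.zip cols).filter (fun hc => !(PySem.Set.contains skip hc.1))
  (kept.map (fun hc => pvDisplayName d hc.1), kept.map (fun hc => hc.2))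

-- ===== PRECONDITION & SPEC =====
def Spec_filter_columns_py (headers : List String) (cols : List (List String)) (display_header_lookup : List (String × String)) (additional_header_lookup : List String) (out : List String × List (List String)) : Prop := out = filter_columns_py_alt headers cols display_header_lookup additional_header_lookup
instance (headers : List String) (cols : List (List String)) (display_header_lookup : List (String × String)) (additional_header_lookup : List String) (out : List String × List (List String)) : Decidable (Spec_filter_columns_py headers cols display_header_lookup additional_header_lookup out) := by unfold Spec_filter_columns_py; infer_instance

-- ===== CLAIM (what is proved, stated in full; the proofs are below) =====
def Claim_equal_filter_columns_py : Prop := ∀ (headers : List String) (cols : List (List String)) (display_header_lookup : List (String × String)) (additional_header_lookup : List String), Dom_filter_columns_py headers cols display_header_lookup additional_header_lookup → Spec_filter_columns_py headers cols display_header_lookup additional_header_lookup (filter_columns_py headers cols display_header_lookup additional_header_lookup)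

-- ===== LEMMAS AND PROOFS =====

-- the lexicographic sort key A uses: (-match_length, key)
def pvKey (p : String × Nat) : Lex (Int × String) := toLex (-((p.2 : Int)), p.1)

lemma pvKey_inj : Function.Injective pvKey := by
  intro a b h
  unfold pvKey at h
  have h' := toLex.injective h
  have h1 : -((a.2 : Int)) = -((b.2 : Int)) := congrArg Prod.fst h'
  have h2 : a.1 = b.1 := congrArg Prod.snd h'
  have h3 : a.2 = b.2 := by omega
  exact Prod.ext h2 h3

lemma pvKey_lt_iff (km b : String × Nat) :
    pvKey km < pvKey b ↔ (b.2 < km.2 ∨ (km.2 = b.2 ∧ km.1 < b.1)) := by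
  unfold pvKey
  rw [Prod.Lex.toLex_lt_toLex]
  constructor
  · rintro (h | ⟨h1, h2⟩)
    · left; omega
    · right; exact ⟨by omega, h2⟩
  · rintro (h | ⟨h1, h2⟩)
    · left; omega
    · right; exact ⟨by omega, h2⟩

lemma pvMatchLength_eq_prefixLen (a b : List Char) :
    pvMatchLength a b = pvPrefixLen (a.zip b) := by
  induction a generalizing b with
  | nil => cases b <;> simp [pvMatchLength, pvPrefixLen]
  | cons x xs ih =>
    cases b with
    | nil => simp [pvMatchLength, pvPrefixLen]
    | cons y ys => simp [pvMatchLength, pvPrefixLen, ih]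

lemma pvBestStep_some (b km : String × Nat) :
    pvBestStep (some b) km = if pvKey km < pvKey b then some km else some b := by
  show (if b.2 < km.2 ∨ (km.2 = b.2 ∧ km.1 < b.1) then some km else some b) = _
  exact (if_congr (pvKey_lt_iff km b) rfl rfl).symm

-- A's sort with the tuple key (-x.2, x.1) is the sort with the lexicographic key pvKey
lemma pvSorted2_eq_sorted_lex (xs : List (String × Nat)) :
    PySem.List.sorted2 xs (fun x => -((x.2 : Int))) (fun x => x.1)
      = PySem.List.sorted xs pvKey := by
  show List.foldl _ [] xs = List.foldl _ [] xs
  congr 1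
  funext acc x
  congr 1
  funext a b
  show (decide (-((a.2:Int)) < -((b.2:Int))) || (!decide (-((b.2:Int)) < -((a.2:Int))) && decide (a.1 < b.1)))
      = decide (pvKey a < pvKey b)
  simp only [pvKey_lt_iff]
  rcases lt_trichotomy (-((a.2:Int))) (-((b.2:Int))) with h | h | h
  · have hb : b.2 < a.2 := by omega
    simp [h, hb]
  · have hb : a.2 = b.2 := by omega
    simp [hb]
  · have h1 : ¬ (-((a.2:Int)) < -((b.2:Int))) := asymm h
    have hb : ¬ (b.2 < a.2) := by omega
    have hb2 : a.2 ≠ b.2 := by omega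
    simp [h1, h, hb, hb2]

-- fold of pvBestStep over a list computes a minimum under pvKey
lemma pvBest_min (l : List (String × Nat)) (m : String × Nat) :
    ∃ m', l.foldl pvBestStep (some m) = some m' ∧ m' ∈ m :: l ∧
      ∀ y ∈ m :: l, pvKey m' ≤ pvKey y := by
  induction l generalizing m with
  | nil => exact ⟨m, rfl, List.mem_cons_self, by intro y hy; simp at hy; simp [hy]⟩
  | cons km t ih =>
    simp only [List.foldl_cons, pvBestStep_some]
    by_cases h : pvKey km < pvKey m
    · rw [if_pos h]
      obtain ⟨m', hf, hmem, hmin⟩ := ih km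
      refine ⟨m', hf, ?_, ?_⟩
      · rcases List.mem_cons.1 hmem with rfl | h'
        · simp
        · simp [h']
      · intro y hy
        rcases List.mem_cons.1 hy with rfl | hy'
        · exact le_trans (hmin km List.mem_cons_self) (le_of_lt h)
        · exact hmin y hy'
    · rw [if_neg h]
      obtain ⟨m', hf, hmem, hmin⟩ := ih m
      refine ⟨m', hf, ?_, ?_⟩
      · rcases List.mem_cons.1 hmem with rfl | h'
        · simp
        · simp [h']
      · intro y hy
        rcases List.mem_cons.1 hy with rfl | hy'
        · exact hmin y List.mem_cons_self
        · rcases List.mem_cons.1 hy' with rfl | hy''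
          · exact le_trans (hmin m List.mem_cons_self) (not_lt.1 h)
          · exact hmin y (List.mem_cons.2 (Or.inr hy''))

lemma pvCount_fold (l : List String) (c : Int) :
    l.foldl (fun (c : Int) _ => c + 1) c = c + l.length := by
  induction l generalizing c with
  | nil => simp
  | cons x t ih =>
    simp [List.foldl_cons, ih]
    omega

lemma pvFilter_map {α β : Type} (f : α → β) (p : β → Bool) (l : List α) :
    (l.map f).filter p = (l.filter (fun x => p (f x))).map f := by
  induction l with
  | nil => rfl
  | cons x t ih =>
    by_cases h : p (f x) = true
    · simp [h, ih]
    · simp [h, ih]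

-- per-header: A's lookup/sort/strip decision equals B's lookup/fold decision
lemma pvName_eq (d : PySem.Dict String String) (h : String) :
    (if d.contains h then d.getD h ""
     else if 1 < (pvPartialKeyMatch d h).length then
       PySem.Str.slice h (some (PySem.Str.len ((pvPartialKeyMatch d h).headD "") + 1)) none
     else h)
      = pvDisplayName d h := by
  by_cases hcon : d.contains h = true
  · simp [pvDisplayName, hcon]
  · have hmlA : ∀ k : String, pvMatchLength k.toList h.toList
        = pvPrefixLen (k.toList.zip h.toList) := fun k => pvMatchLength_eq_prefixLen _ _
    set ml := fun k : String => pvPrefixLen (k.toList.zip h.toList) with hml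
    set pairs := d.keys.map (fun k => (k, ml k)) with hpairs
    set pos := pairs.filter (fun q => decide (0 < q.2)) with hpos
    -- B's fold computes (|pos|, fold of pvBestStep over pos)
    have hB : d.keys.foldl
        (fun (s : Int × Option (String × Nat)) key =>
          let m := pvPrefixLen (key.toList.zip h.toList)
          if 0 < m then (s.1 + 1, pvBestStep s.2 (key, m)) else s)
        (0, none)
        = ((pos.length : Int), pos.foldl pvBestStep none) := by
      have e1 := PySem.List.foldl_ite_eq_foldl_filter (fun k : String => 0 < ml k)
        (fun (s : Int × Option (String × Nat)) key => (s.1 + 1, pvBestStep s.2 (key, ml key)))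
        d.keys ((0 : Int), (none : Option (String × Nat)))
      rw [show (fun (s : Int × Option (String × Nat)) key =>
            let m := pvPrefixLen (key.toList.zip h.toList)
            if 0 < m then (s.1 + 1, pvBestStep s.2 (key, m)) else s)
          = (fun (s : Int × Option (String × Nat)) (key : String) =>
            if 0 < ml key then (s.1 + 1, pvBestStep s.2 (key, ml key)) else s) from rfl]
      rw [e1]
      rw [PySem.List.foldl_prod_mk (f := fun (c : Int) _ => c + 1)
        (g := fun b key => pvBestStep b (key, ml key))]
      have e2 : pos = (d.keys.filter (fun k => decide (0 < ml k))).map (fun k => (k, ml k)) := by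
        rw [hpos, hpairs]
        exact pvFilter_map _ _ _
      rw [pvCount_fold, e2, List.length_map, List.foldl_map]
      simp
    -- A's matches list is the filtered pvKey-sort of the same pairs
    have hA : pvPartialKeyMatch d h
        = ((PySem.List.sorted pairs pvKey).filter (fun q => decide (0 < q.2))).map (fun x => x.1) := by
      unfold pvPartialKeyMatch
      have e3 : d.keys.map (fun key => (key, pvMatchLength key.toList h.toList)) = pairs := by
        rw [hpairs]
        exact List.map_congr_left (fun k _ => by rw [hmlA])
      simp only [e3, pvSorted2_eq_sorted_lex]
    have hperm : ((PySem.List.sorted pairs pvKey).filter (fun q => decide (0 < q.2))).Perm pos :=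
      (PySem.List.sorted_perm pairs pvKey false).filter _
    have hlen : (pvPartialKeyMatch d h).length = pos.length := by
      rw [hA, List.length_map, hperm.length_eq]
    simp only [pvDisplayName, hcon, Bool.false_eq_true, if_false, hB]
    by_cases hgt : 1 < pos.length
    · -- both strip; show the stripped key is the same
      have hflne : (PySem.List.sorted pairs pvKey).filter (fun q => decide (0 < q.2)) ≠ [] := by
        intro he
        rw [hperm.symm.length_eq, he] at hgt
        simp at hgt
      obtain ⟨mA, tl, hflc⟩ := List.exists_cons_of_ne_nil hflne
      have hminA : ∀ y ∈ pos, pvKey mA ≤ pvKey y := by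
        have hpw := (PySem.List.sorted_pairwise pairs pvKey).filter (fun q => decide (0 < q.2))
        rw [hflc] at hpw
        intro y hy
        have hy2 : y ∈ mA :: tl := hflc ▸ (hperm.mem_iff.2 hy)
        rcases List.mem_cons.1 hy2 with rfl | hy'
        · exact le_refl _
        · exact (List.pairwise_cons.1 hpw).1 y hy'
      have hmAmem : mA ∈ pos := hperm.subset (by rw [hflc]; exact List.mem_cons_self)
      have hposne : pos ≠ [] := by
        intro he
        rw [he] at hgt
        simp at hgt
      obtain ⟨q, rest, hposc⟩ := List.exists_cons_of_ne_nil hposne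
      obtain ⟨mB, hfB, hmBmem, hminB⟩ := pvBest_min rest q
      have hfoldB : pos.foldl pvBestStep none = some mB := by
        rw [hposc, List.foldl_cons]
        exact hfB
      have hABeq : mA = mB := by
        apply pvKey_inj
        exact le_antisymm (hminA mB (by rw [hposc]; exact hmBmem))
          (hminB mA (by rw [← hposc]; exact hmAmem))
      have hgtA : 1 < (pvPartialKeyMatch d h).length := by rw [hlen]; exact hgt
      have hgtB : (1 : Int) < (pos.length : Int) := by exact_mod_cast hgt
      have hheadD : (pvPartialKeyMatch d h).headD "" = mA.1 := by
        rw [hA, hflc]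
        rfl
      rw [if_pos hgtA, if_pos hgtB, hfoldB, hheadD, hABeq]
    · have hgtA : ¬ 1 < (pvPartialKeyMatch d h).length := by rw [hlen]; exact hgt
      have hgtB : ¬ (1 : Int) < (pos.length : Int) := by exact_mod_cast hgt
      rw [if_neg hgtA, if_neg hgtB]

-- one step of A's accumulator loop
lemma pvStepA (d : PySem.Dict String String) (ahl : List String)
    (acc : List String × List (List String)) (hc : String × List String) :
    (if hc.1 ∈ ahl then acc
     else if d.contains hc.1 then (acc.1 ++ [d.getD hc.1 ""], acc.2 ++ [hc.2])
     else
       let ms := pvPartialKeyMatch d hc.1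
       if 1 < ms.length then
         (acc.1 ++ [PySem.Str.slice hc.1 (some (PySem.Str.len (ms.headD "") + 1)) none], acc.2 ++ [hc.2])
       else (acc.1 ++ [hc.1], acc.2 ++ [hc.2]))
    = if hc.1 ∈ ahl then acc else (acc.1 ++ [pvDisplayName d hc.1], acc.2 ++ [hc.2]) := by
  by_cases hmem : hc.1 ∈ ahl
  · simp [hmem]
  · rw [if_neg hmem, if_neg hmem, ← pvName_eq d hc.1]
    by_cases hc1 : d.contains hc.1 = true
    · simp [hc1]
    · simp only [hc1, Bool.false_eq_true, if_false]
      by_cases hlen : 1 < (pvPartialKeyMatch d hc.1).length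
      · simp [hlen]
      · simp [hlen]

-- A's accumulator loop, rolled out: filter then map over the kept rows
lemma pvFoldA (d : PySem.Dict String String) (ahl : List String)
    (zs : List (String × List String)) (acc : List String × List (List String)) :
    zs.foldl
      (fun (acc : List String × List (List String)) hc =>
        if hc.1 ∈ ahl then acc
        else if d.contains hc.1 then (acc.1 ++ [d.getD hc.1 ""], acc.2 ++ [hc.2])
        else
          let ms := pvPartialKeyMatch d hc.1
          if 1 < ms.length then
            (acc.1 ++ [PySem.Str.slice hc.1 (some (PySem.Str.len (ms.headD "") + 1)) none], acc.2 ++ [hc.2])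
          else (acc.1 ++ [hc.1], acc.2 ++ [hc.2])) acc
    = (acc.1 ++ ((zs.filter (fun hc => !decide (hc.1 ∈ ahl))).map (fun hc => pvDisplayName d hc.1)),
       acc.2 ++ ((zs.filter (fun hc => !decide (hc.1 ∈ ahl))).map (fun hc => hc.2))) := by
  induction zs generalizing acc with
  | nil => simp
  | cons hc t ih =>
    rw [List.foldl_cons, pvStepA]
    by_cases hmem : hc.1 ∈ ahl
    · rw [if_pos hmem, ih]
      simp [hmem]
    · rw [if_neg hmem, ih]
      simp [hmem]

-- ===== VERDICT (by name: the statement is the Claim_ definition above) =====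
theorem filter_columns_py_spec : Claim_equal_filter_columns_py := by
  intro headers cols dhl ahl _
  unfold Spec_filter_columns_py
  simp only [filter_columns_py, filter_columns_py_alt]
  rw [pvFoldA]
  have hfilter : ((headers.zip cols).filter (fun hc => !decide (hc.1 ∈ ahl ++ ["site_id"])))
      = ((headers.zip cols).filter
          (fun hc => !(PySem.Set.contains (PySem.Set.add (PySem.Set.ofList ahl) "site_id") hc.1))) := by
    apply List.filter_congr
    intro hc _
    have hiff : (hc.1 ∈ ahl ++ ["site_id"]) ↔ hc.1 ∈ PySem.Set.add (PySem.Set.ofList ahl) "site_id" := by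
      rw [PySem.Set.mem_add, PySem.Set.mem_ofList]
      simp
    have hb : decide (hc.1 ∈ ahl ++ ["site_id"])
        = PySem.Set.contains (PySem.Set.add (PySem.Set.ofList ahl) "site_id") hc.1 := by
      by_cases hx : hc.1 ∈ ahl ++ ["site_id"]
      · simp [hx]
        simpa using hx
      · simp only [hx, decide_false]
        symm
        rw [← Bool.not_eq_true, PySem.Set.contains_iff]
        exact fun hm => hx (hiff.2 hm)
    rw [hb]
  rw [hfilter]
  simp
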